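-- pv_equiv track=rewrite | github.com/google-research/tapas | tapas/utils/beam_utils.py | _get_sharded_ranges
-- ===== SOURCE A (Python) =====
-- def _get_sharded_ranges(
--     begin,
--     end,
--     max_length,
-- ):
--   """Recursively cuts ranges in half to satisfy 'max_length'."""
--   if max_length <= 0:
--     raise ValueError("max_length <= 0.")
--   length = end - begin
--   if length <= max_length:
--     return [(begin, end)]
--   pivot = begin + length // 2
--   return (_get_sharded_ranges(begin, pivot, max_length) +
--           _get_sharded_ranges(pivot, end, max_length))
-- ===== SOURCE B (Python) =====
-- def _get_sharded_ranges(
--     begin,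
--     end,
--     max_length,
-- ):
--   """Iterative DFS with an explicit stack instead of recursion."""
--   if max_length <= 0:
--     raise ValueError("max_length <= 0.")
--   shards = []
--   stack = [(begin, end)]
--   while stack:
--     b, e = stack.pop()
--     if e - b <= max_length:
--       shards.append((b, e))
--     else:
--       pivot = b + (e - b) // 2
--       stack.append((pivot, e))
--       stack.append((b, pivot))
--   return shards
-- ===== Notes on version B (the rewrite author's own statement) =====
-- stated objective: alternative
-- what changed: Replaces the binary recursion (with list concatenation at every level) by an explicit stack-based DFS that appends each finished shard once to an output list, pushing the right half before the left to keep left-to-right order.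
import Mathlib
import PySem

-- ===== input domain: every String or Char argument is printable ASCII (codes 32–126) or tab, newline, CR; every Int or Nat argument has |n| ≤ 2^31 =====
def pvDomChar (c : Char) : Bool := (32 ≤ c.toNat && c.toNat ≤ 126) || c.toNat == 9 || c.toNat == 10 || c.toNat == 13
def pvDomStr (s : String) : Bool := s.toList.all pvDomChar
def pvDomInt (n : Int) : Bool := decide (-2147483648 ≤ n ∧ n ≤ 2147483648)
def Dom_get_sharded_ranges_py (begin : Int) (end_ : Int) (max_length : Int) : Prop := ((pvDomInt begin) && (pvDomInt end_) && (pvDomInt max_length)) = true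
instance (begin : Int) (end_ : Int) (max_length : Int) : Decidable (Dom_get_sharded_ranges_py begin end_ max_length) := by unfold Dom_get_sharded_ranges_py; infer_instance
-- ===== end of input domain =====

-- B replaces A's binary recursion (which concatenates sublists at every level) by an
-- explicit stack-based DFS appending each finished shard once; same shards, same order.

-- ===== PORT A =====
-- literal port of the recursive _get_sharded_ranges; the fuel argument only makes the
-- recursion total (fuel (end-begin).toNat + 1 dominates the recursion depth, proved in
-- pvARec_fuel below); the 'raise ValueError' branch (max_length <= 0) is excluded by
-- Pre_ and returns [] here.
def pvARec (fuel : Nat) (b : Int) (e : Int) (m : Int) : List (Int × Int) :=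
  match fuel with
  | 0 => [(b, e)]        -- never reached from get_sharded_ranges_py (fuel dominates the depth)
  | fuel + 1 =>
    if m ≤ 0 then []     -- Python: raise ValueError("max_length <= 0.")
    else if e - b ≤ m then [(b, e)]
    else
      let pivot := b + PySem.Int.floordiv (e - b) 2
      pvARec fuel b pivot m ++ pvARec fuel pivot e m

def get_sharded_ranges_py (begin : Int) (end_ : Int) (max_length : Int) : List (Int × Int) :=
  pvARec ((end_ - begin).toNat + 1) begin end_ max_length

-- ===== PORT B =====
-- the while loop of Source B: Lean list head = top of the Python stack; the fuel argument
-- only makes the loop total (2*(end-begin).toNat + 1 dominates the iteration count,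
-- proved in pvBLoop_eq below)
def pvBLoop (fuel : Nat) (m : Int) (stack : List (Int × Int)) (shards : List (Int × Int)) : List (Int × Int) :=
  match fuel, stack with
  | _, [] => shards
  | 0, _ => shards       -- never reached from get_sharded_ranges_py_alt (fuel dominates the iteration count)
  | fuel + 1, (b, e) :: rest =>
    if e - b ≤ m then pvBLoop fuel m rest (shards ++ [(b, e)])
    else
      let pivot := b + PySem.Int.floordiv (e - b) 2
      pvBLoop fuel m ((b, pivot) :: (pivot, e) :: rest) shards

def get_sharded_ranges_py_alt (begin : Int) (end_ : Int) (max_length : Int) : List (Int × Int) :=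
  if max_length ≤ 0 then []   -- Python: raise ValueError("max_length <= 0.")
  else pvBLoop (2 * (end_ - begin).toNat + 1) max_length [(begin, end_)] []

-- ===== PRECONDITION & SPEC =====
-- Pre_ excludes exactly max_length ≤ 0, where both A and B raise ValueError.
def Pre_get_sharded_ranges_py (begin : Int) (end_ : Int) (max_length : Int) : Prop :=
  0 < max_length
instance (begin : Int) (end_ : Int) (max_length : Int) : Decidable (Pre_get_sharded_ranges_py begin end_ max_length) := by unfold Pre_get_sharded_ranges_py; infer_instance
def pvWitness_get_sharded_ranges_py : Int × Int × Int := (0, 5, 2)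

def Spec_get_sharded_ranges_py (begin : Int) (end_ : Int) (max_length : Int) (out : List (Int × Int)) : Prop := out = get_sharded_ranges_py_alt begin end_ max_length
instance (begin : Int) (end_ : Int) (max_length : Int) (out : List (Int × Int)) : Decidable (Spec_get_sharded_ranges_py begin end_ max_length out) := by unfold Spec_get_sharded_ranges_py; infer_instance

-- ===== CLAIM (what is proved, stated in full; the proofs are below) =====
def Claim_equal_get_sharded_ranges_py : Prop := ∀ (begin : Int) (end_ : Int) (max_length : Int), Dom_get_sharded_ranges_py begin end_ max_length → Pre_get_sharded_ranges_py begin end_ max_length → Spec_get_sharded_ranges_py begin end_ max_length (get_sharded_ranges_py begin end_ max_length)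

-- ===== LEMMAS AND PROOFS =====

-- bounds for the halving pivot on a segment that still needs splitting
theorem pvPivotBounds (b e m : Int) (hm : 0 < m) (hl : ¬ e - b ≤ m) :
    1 ≤ PySem.Int.floordiv (e - b) 2 ∧ PySem.Int.floordiv (e - b) 2 ≤ e - b - 1 := by
  rw [PySem.Int.floordiv_eq_ediv_of_pos (by norm_num)]
  omega

-- any fuel above the recursion depth computes the same value (0 < m)
theorem pvARec_fuel (m : Int) (hm : 0 < m) :
    ∀ fuel b e, (e - b).toNat < fuel → pvARec fuel b e m = pvARec ((e - b).toNat + 1) b e m := by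
  intro fuel
  induction fuel using Nat.strong_induction_on with
  | _ fuel ih =>
    intro b e hf
    match fuel with
    | 0 => omega
    | f + 1 =>
      by_cases hle : e - b ≤ m
      · simp only [pvARec, not_le.mpr hm, if_false, hle, if_true]
      · obtain ⟨hq1, hq2⟩ := pvPivotBounds b e m hm hle
        simp only [pvARec, not_le.mpr hm, if_false, hle]
        have h1 : (b + PySem.Int.floordiv (e - b) 2 - b).toNat < f := by omega
        have h2 : (e - (b + PySem.Int.floordiv (e - b) 2)).toNat < f := by omega
        have h1' : (b + PySem.Int.floordiv (e - b) 2 - b).toNat < (e - b).toNat := by omega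
        have h2' : (e - (b + PySem.Int.floordiv (e - b) 2)).toNat < (e - b).toNat := by omega
        rw [ih f (by omega) _ _ h1, ih f (by omega) _ _ h2,
            ih (e - b).toNat (by omega) _ _ h1', ih (e - b).toNat (by omega) _ _ h2']

-- A's value on a finished segment
theorem pvA_base (b e m : Int) (hm : 0 < m) (hle : e - b ≤ m) :
    get_sharded_ranges_py b e m = [(b, e)] := by
  rw [get_sharded_ranges_py, pvARec, if_neg (not_le.mpr hm), if_pos hle]

-- A's value on a segment that splits
theorem pvA_split (b e m : Int) (hm : 0 < m) (hl : ¬ e - b ≤ m) :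
    get_sharded_ranges_py b e m
      = get_sharded_ranges_py b (b + PySem.Int.floordiv (e - b) 2) m
        ++ get_sharded_ranges_py (b + PySem.Int.floordiv (e - b) 2) e m := by
  obtain ⟨hq1, hq2⟩ := pvPivotBounds b e m hm hl
  conv_lhs => rw [get_sharded_ranges_py, pvARec]
  rw [if_neg (not_le.mpr hm), if_neg hl]
  show pvARec (e - b).toNat b (b + PySem.Int.floordiv (e - b) 2) m
      ++ pvARec (e - b).toNat (b + PySem.Int.floordiv (e - b) 2) e m = _
  rw [pvARec_fuel m hm (e - b).toNat _ _ (by omega),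
      pvARec_fuel m hm (e - b).toNat _ _ (by omega)]
  rfl

-- fuel cost of one pending segment in the stack loop
def pvCost (s : Int × Int) : Nat := max (2 * (s.2 - s.1).toNat - 1) 1

-- loop invariant: with enough fuel the stack loop emits, in order, A's shards of every
-- pending segment
theorem pvBLoop_eq (m : Int) (hm : 0 < m) :
    ∀ fuel stack shards, (stack.map pvCost).sum ≤ fuel →
      pvBLoop fuel m stack shards
        = shards ++ stack.flatMap (fun s => get_sharded_ranges_py s.1 s.2 m) := by
  intro fuel
  induction fuel with
  | zero =>
    intro stack shards hf
    match stack with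
    | [] => simp [pvBLoop]
    | (b, e) :: rest =>
      exfalso
      have : 1 ≤ pvCost (b, e) := le_max_right _ _
      simp only [List.map_cons, List.sum_cons] at hf
      omega
  | succ f ih =>
    intro stack shards hf
    match stack with
    | [] => simp [pvBLoop]
    | (b, e) :: rest =>
      simp only [List.map_cons, List.sum_cons] at hf
      by_cases hle : e - b ≤ m
      · have h1 : 1 ≤ pvCost (b, e) := le_max_right _ _
        rw [pvBLoop, if_pos hle, ih rest (shards ++ [(b, e)]) (by omega)]
        simp [pvA_base b e m hm hle]
      · obtain ⟨hq1, hq2⟩ := pvPivotBounds b e m hm hle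
        have hc : pvCost (b, b + PySem.Int.floordiv (e - b) 2)
            + pvCost (b + PySem.Int.floordiv (e - b) 2, e) + 1 ≤ pvCost (b, e) := by
          simp only [pvCost]
          omega
        rw [pvBLoop, if_neg hle,
          ih _ shards (by simp only [List.map_cons, List.sum_cons]; omega)]
        simp only [List.flatMap_cons, pvA_split b e m hm hle, List.append_assoc]

-- ===== VERDICT (by name: the statement is the Claim_ definition above) =====
theorem get_sharded_ranges_py_spec : Claim_equal_get_sharded_ranges_py := by
  intro b e m _ hpre
  unfold Spec_get_sharded_ranges_py get_sharded_ranges_py_alt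
  rw [if_neg (not_le.mpr hpre),
      pvBLoop_eq m hpre _ [(b, e)] [] (by simp only [List.map_cons, List.map_nil, List.sum_cons, List.sum_nil, pvCost]; omega)]
  simp
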